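-- pv_equiv track=rewrite | github.com/sarahekaireb/CSE237D_Rock_Climbing_Coach | src/utils/pc_complete_utils.py | get_last_double_handhold_color
-- ===== SOURCE A (Python) =====
-- def joint_in_hold(joint, hold):
--     # joint is (x, y)
--     # hold is [(x_min, y_min), (x_max, y_max)]
--     jx, jy = joint
--     h_xmin, h_ymin = hold[0]
--     h_xmax, h_ymax = hold[1]
--
--     if jx <= h_xmax and jx >= h_xmin and jy <= h_ymax and jy >= h_ymin:
--         return True
--     else:
--         return False
--
-- def get_last_double_handhold_color(holds, positions, colors, color):
--     last_idx = -1
--     zipped = list(zip(positions['left_hand'], positions['right_hand']))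
--     for i in range(len(zipped)):
--         lh, rh = zipped[i]
--         for j in range(len(holds)):
--             if joint_in_hold(lh, holds[j]) and joint_in_hold(rh, holds[j]) and colors[j] == color:
--                 last_idx = j
--     return last_idx
-- ===== SOURCE B (Python) =====
-- def joint_in_hold(joint, hold):
--     jx, jy = joint
--     h_xmin, h_ymin = hold[0]
--     h_xmax, h_ymax = hold[1]
--     if jx <= h_xmax and jx >= h_xmin and jy <= h_ymax and jy >= h_ymin:
--         return True
--     else:
--         return False
--
-- def get_last_double_handhold_color(holds, positions, colors, color):
--     # Reverse search with early exit: the last matching (frame, hold) pair in A's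
--     # scan order is the first match when scanning frames, then holds, from the end.
--     lhs = positions['left_hand']
--     rhs = positions['right_hand']
--     for i in range(min(len(lhs), len(rhs)) - 1, -1, -1):
--         lh, rh = lhs[i], rhs[i]
--         for j in range(len(holds) - 1, -1, -1):
--             if joint_in_hold(lh, holds[j]) and joint_in_hold(rh, holds[j]) and colors[j] == color:
--                 return j
--     return -1
-- ===== Notes on version B (the rewrite author's own statement) =====
-- stated objective: alternative
-- what changed: Replaces A's exhaustive forward double loop that keeps overwriting last_idx with a reverse search (frames then holds scanned from the end) that returns at the first match.
import Mathlib
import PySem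

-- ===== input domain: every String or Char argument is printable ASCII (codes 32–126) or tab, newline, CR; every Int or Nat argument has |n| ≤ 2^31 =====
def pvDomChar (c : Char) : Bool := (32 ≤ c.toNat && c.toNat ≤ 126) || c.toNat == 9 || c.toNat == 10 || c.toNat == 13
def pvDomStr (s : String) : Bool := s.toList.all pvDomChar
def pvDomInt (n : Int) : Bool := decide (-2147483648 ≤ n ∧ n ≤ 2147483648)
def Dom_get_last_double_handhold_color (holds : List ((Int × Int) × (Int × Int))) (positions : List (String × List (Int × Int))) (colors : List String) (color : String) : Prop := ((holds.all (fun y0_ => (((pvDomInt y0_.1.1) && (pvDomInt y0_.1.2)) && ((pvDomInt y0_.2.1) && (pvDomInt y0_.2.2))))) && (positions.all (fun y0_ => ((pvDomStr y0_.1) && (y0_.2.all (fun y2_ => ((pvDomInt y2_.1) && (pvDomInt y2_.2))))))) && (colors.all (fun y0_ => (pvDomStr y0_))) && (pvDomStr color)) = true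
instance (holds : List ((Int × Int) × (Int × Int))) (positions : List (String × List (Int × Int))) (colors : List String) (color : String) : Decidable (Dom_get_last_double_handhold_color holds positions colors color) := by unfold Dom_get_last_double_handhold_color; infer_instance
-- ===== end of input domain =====

-- B replaces A's exhaustive forward scan (which keeps overwriting last_idx) by a reverse
-- search over frames and holds that returns at the first match; equivalence of the RETURN
-- value is proved on Pre_ (exactly the inputs where A raises no KeyError/IndexError).

-- ===== PORT A =====
def joint_in_hold (joint : Int × Int) (hold : (Int × Int) × (Int × Int)) : Bool :=
  if joint.1 ≤ hold.2.1 ∧ joint.1 ≥ hold.1.1 ∧ joint.2 ≤ hold.2.2 ∧ joint.2 ≥ hold.1.2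
  then true else false

-- colors[j] is read with getD; under Pre_ the index is always in range, so this is exact.
def get_last_double_handhold_color (holds : List ((Int × Int) × (Int × Int))) (positions : List (String × List (Int × Int))) (colors : List String) (color : String) : Int :=
  let zipped := List.zip (((PySem.Dict.mk positions).get? "left_hand").getD [])
                         (((PySem.Dict.mk positions).get? "right_hand").getD [])
  zipped.foldl
    (fun last_idx p =>
      (PySem.List.enumerate holds).foldl
        (fun acc jh =>
          if joint_in_hold p.1 jh.2 && joint_in_hold p.2 jh.2 && (PySem.List.pyGetD colors jh.1 "" == color)
          then jh.1 else acc)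
        last_idx)
    (-1)

-- ===== PORT B =====
-- inner loop of Source B: scan the holds from the end, return the first full match
def pvFindHold (colors : List String) (color : String) (lh rh : Int × Int) :
    List (Int × ((Int × Int) × (Int × Int))) → Option Int
  | [] => none
  | jh :: rest =>
    if joint_in_hold lh jh.2 && joint_in_hold rh jh.2 && (PySem.List.pyGetD colors jh.1 "" == color)
    then some jh.1
    else pvFindHold colors color lh rh rest

-- outer loop of Source B: scan the frames from the end, return at the first matching frame
def pvScanFrames (holds : List ((Int × Int) × (Int × Int))) (colors : List String) (color : String) :
    List ((Int × Int) × (Int × Int)) → Int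
  | [] => -1
  | p :: rest =>
    match pvFindHold colors color p.1 p.2 (PySem.List.enumerate holds).reverse with
    | some j => j
    | none => pvScanFrames holds colors color rest

def get_last_double_handhold_color_alt (holds : List ((Int × Int) × (Int × Int))) (positions : List (String × List (Int × Int))) (colors : List String) (color : String) : Int :=
  let lhs := ((PySem.Dict.mk positions).get? "left_hand").getD []
  let rhs := ((PySem.Dict.mk positions).get? "right_hand").getD []
  pvScanFrames holds colors color (List.zip lhs rhs).reverse

-- ===== PRECONDITION & SPEC =====
-- Pre_ = exactly where Python A returns: both keys present (else KeyError) and no frame puts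
-- both hands in a hold whose index is beyond colors (else IndexError on colors[j]).
def Pre_get_last_double_handhold_color (holds : List ((Int × Int) × (Int × Int))) (positions : List (String × List (Int × Int))) (colors : List String) (color : String) : Prop :=
  ((PySem.Dict.mk positions).get? "left_hand").isSome = true ∧
  ((PySem.Dict.mk positions).get? "right_hand").isSome = true ∧
  ∀ p ∈ List.zip (((PySem.Dict.mk positions).get? "left_hand").getD [])
                 (((PySem.Dict.mk positions).get? "right_hand").getD []),
    ∀ jh ∈ PySem.List.enumerate holds, (colors.length : Int) ≤ jh.1 →
      ¬(joint_in_hold p.1 jh.2 = true ∧ joint_in_hold p.2 jh.2 = true)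
instance (holds : List ((Int × Int) × (Int × Int))) (positions : List (String × List (Int × Int))) (colors : List String) (color : String) : Decidable (Pre_get_last_double_handhold_color holds positions colors color) := by unfold Pre_get_last_double_handhold_color; infer_instance

def pvWitness_get_last_double_handhold_color : (List ((Int × Int) × (Int × Int))) × (List (String × List (Int × Int))) × List String × String :=
  ([((0, 0), (2, 2))], [("left_hand", [(1, 1)]), ("right_hand", [(1, 1)])], ["red"], "red")

def Spec_get_last_double_handhold_color (holds : List ((Int × Int) × (Int × Int))) (positions : List (String × List (Int × Int))) (colors : List String) (color : String) (out : Int) : Prop := out = get_last_double_handhold_color_alt holds positions colors color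
instance (holds : List ((Int × Int) × (Int × Int))) (positions : List (String × List (Int × Int))) (colors : List String) (color : String) (out : Int) : Decidable (Spec_get_last_double_handhold_color holds positions colors color out) := by unfold Spec_get_last_double_handhold_color; infer_instance

-- ===== CLAIM (what is proved, stated in full; the proofs are below) =====
def Claim_equal_get_last_double_handhold_color : Prop := ∀ (holds : List ((Int × Int) × (Int × Int))) (positions : List (String × List (Int × Int))) (colors : List String) (color : String), Dom_get_last_double_handhold_color holds positions colors color → Pre_get_last_double_handhold_color holds positions colors color → Spec_get_last_double_handhold_color holds positions colors color (get_last_double_handhold_color holds positions colors color)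

-- ===== LEMMAS AND PROOFS =====

-- a foldl that overwrites its state with (m a) when it fires is the first hit of the reversed list
theorem foldl_getD_eq_findSome?_reverse {α β : Type} (m : α → Option β) :
    ∀ (L : List α) (s : β),
      L.foldl (fun s a => (m a).getD s) s = (L.reverse.findSome? m).getD s := by
  intro L
  induction L with
  | nil => intro s; simp
  | cons a t ih =>
    intro s
    simp only [List.foldl_cons, List.reverse_cons, List.findSome?_append, ih]
    cases h : t.reverse.findSome? m with
    | none => cases hm : m a <;> simp [hm]
    | some b => simp

theorem pvFindHold_eq_findSome? (colors : List String) (color : String) (lh rh : Int × Int) :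
    ∀ (l : List (Int × ((Int × Int) × (Int × Int)))),
      pvFindHold colors color lh rh l =
        l.findSome? (fun jh =>
          if joint_in_hold lh jh.2 && joint_in_hold rh jh.2 && (PySem.List.pyGetD colors jh.1 "" == color)
          then some jh.1 else none) := by
  intro l
  induction l with
  | nil => rfl
  | cons jh rest ih =>
    simp only [pvFindHold, List.findSome?_cons, ih]
    by_cases h : (joint_in_hold lh jh.2 && joint_in_hold rh jh.2 && (PySem.List.pyGetD colors jh.1 "" == color)) = true
    · rw [if_pos h, if_pos h]
    · rw [if_neg h, if_neg h]

theorem pvScanFrames_eq_findSome? (holds : List ((Int × Int) × (Int × Int))) (colors : List String) (color : String) :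
    ∀ (l : List ((Int × Int) × (Int × Int))),
      pvScanFrames holds colors color l =
        (l.findSome? (fun p => pvFindHold colors color p.1 p.2 (PySem.List.enumerate holds).reverse)).getD (-1) := by
  intro l
  induction l with
  | nil => rfl
  | cons p rest ih =>
    simp only [pvScanFrames, List.findSome?_cons, ih]
    cases h : pvFindHold colors color p.1 p.2 (PySem.List.enumerate holds).reverse <;> simp

theorem inner_foldl_eq (holds : List ((Int × Int) × (Int × Int))) (colors : List String)
    (color : String) (lh rh : Int × Int) (s : Int) :
    (PySem.List.enumerate holds).foldl
        (fun acc jh =>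
          if joint_in_hold lh jh.2 && joint_in_hold rh jh.2 && (PySem.List.pyGetD colors jh.1 "" == color)
          then jh.1 else acc) s
      = (pvFindHold colors color lh rh (PySem.List.enumerate holds).reverse).getD s := by
  have hfun : (fun (acc : Int) (jh : Int × ((Int × Int) × (Int × Int))) =>
          if joint_in_hold lh jh.2 && joint_in_hold rh jh.2 && (PySem.List.pyGetD colors jh.1 "" == color)
          then jh.1 else acc)
      = (fun acc jh =>
          ((fun jh => if joint_in_hold lh jh.2 && joint_in_hold rh jh.2 && (PySem.List.pyGetD colors jh.1 "" == color)
                      then some jh.1 else none) jh).getD acc) := by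
    funext acc jh
    by_cases h : (joint_in_hold lh jh.2 && joint_in_hold rh jh.2 && (PySem.List.pyGetD colors jh.1 "" == color)) = true
    · simp only [if_pos h, Option.getD_some]
    · simp only [if_neg h, Option.getD_none]
  rw [hfun, foldl_getD_eq_findSome?_reverse, pvFindHold_eq_findSome?]

-- ===== VERDICT (by name: the statement is the Claim_ definition above) =====
theorem get_last_double_handhold_color_spec : Claim_equal_get_last_double_handhold_color := by
  intro holds positions colors color _ _
  unfold Spec_get_last_double_handhold_color
  unfold get_last_double_handhold_color get_last_double_handhold_color_alt
  simp only [inner_foldl_eq, foldl_getD_eq_findSome?_reverse, pvScanFrames_eq_findSome?]
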